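-- pv_equiv track=rewrite | github.com/AVAuco/laeonetplus | utils/ln_laeoImage.py | mj_getBBsExtent
-- ===== SOURCE A (Python) =====
-- def mj_getBBsExtent(image_bbs):
--     max_x = max(image_bbs[0][0][0], image_bbs[0][1][0])
--     max_y = max(image_bbs[0][0][1], image_bbs[0][1][1])
--     min_x = min(image_bbs[0][0][0], image_bbs[0][1][0])
--     min_y = min(image_bbs[0][0][1], image_bbs[0][1][1])
--     for i in range(1, len(image_bbs)):
--         max_x = max(max_x, image_bbs[i][0][0], image_bbs[i][1][0])
--         max_y = max(max_y, image_bbs[i][0][1], image_bbs[i][1][1])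
--         min_x = min(min_x, image_bbs[i][0][0], image_bbs[i][1][0])
--         min_y = min(min_y, image_bbs[i][0][1], image_bbs[i][1][1])
--
--     return int(min_x), int(min_y), int(max_x), int(max_y)
-- ===== SOURCE B (Python) =====
-- def mj_getBBsExtent(image_bbs):
--     xs = sorted(bb[j][0] for bb in image_bbs for j in (0, 1))
--     ys = sorted(bb[j][1] for bb in image_bbs for j in (0, 1))
--     return int(xs[0]), int(ys[0]), int(xs[-1]), int(ys[-1])
-- ===== Notes on version B (the rewrite author's own statement) =====
-- stated objective: alternative
-- what changed: Replaces the four running min/max accumulators with sort-then-pick-endpoints: all x (resp. y) coordinates of the two corner points are collected, sorted, and the first/last elements of the sorted lists are returned.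
import Mathlib
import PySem

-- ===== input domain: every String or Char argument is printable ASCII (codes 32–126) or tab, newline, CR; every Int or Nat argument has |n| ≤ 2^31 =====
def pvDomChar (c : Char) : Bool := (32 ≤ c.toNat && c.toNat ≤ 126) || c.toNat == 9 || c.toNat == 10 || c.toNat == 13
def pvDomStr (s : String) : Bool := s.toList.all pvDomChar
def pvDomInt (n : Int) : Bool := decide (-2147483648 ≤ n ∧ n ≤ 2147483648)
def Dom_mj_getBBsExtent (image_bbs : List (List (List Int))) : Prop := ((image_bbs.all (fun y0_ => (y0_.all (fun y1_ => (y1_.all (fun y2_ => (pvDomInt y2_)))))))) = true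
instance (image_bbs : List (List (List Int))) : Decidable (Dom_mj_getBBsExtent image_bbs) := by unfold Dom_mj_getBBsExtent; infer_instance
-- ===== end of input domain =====

-- B replaces A's four running min/max accumulators by sort-then-pick-endpoints:
-- it sorts the x and y coordinate lists and returns their first/last elements
-- (alternative algorithm, O(n log n) vs A's O(n)).
-- Pre_ excludes inputs on which Python A raises IndexError: the empty list, and boxes
-- with fewer than two points or points with fewer than two coordinates.

-- ===== PORT A =====
-- bb[j][k] (defaulted; indices are in range under Pre_)
def pvCoord (bb : List (List Int)) (j k : Int) : Int :=
  PySem.List.pyGetD (PySem.List.pyGetD bb j []) k 0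

-- one iteration of A's for-loop over bb = image_bbs[i]
def pvStepA (st : Int × Int × Int × Int) (bb : List (List Int)) : Int × Int × Int × Int :=
  (max (max st.1 (pvCoord bb 0 0)) (pvCoord bb 1 0),
   max (max st.2.1 (pvCoord bb 0 1)) (pvCoord bb 1 1),
   min (min st.2.2.1 (pvCoord bb 0 0)) (pvCoord bb 1 0),
   min (min st.2.2.2 (pvCoord bb 0 1)) (pvCoord bb 1 1))

def mj_getBBsExtent (image_bbs : List (List (List Int))) : Int × Int × Int × Int :=
  let bb0 := PySem.List.pyGetD image_bbs 0 []
  let max_x := max (pvCoord bb0 0 0) (pvCoord bb0 1 0)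
  let max_y := max (pvCoord bb0 0 1) (pvCoord bb0 1 1)
  let min_x := min (pvCoord bb0 0 0) (pvCoord bb0 1 0)
  let min_y := min (pvCoord bb0 0 1) (pvCoord bb0 1 1)
  let st := (PySem.List.pyRange 1 (image_bbs.length : Int) 1).foldl
    (fun st i => pvStepA st (PySem.List.pyGetD image_bbs i []))
    (max_x, max_y, min_x, min_y)
  (st.2.2.1, st.2.2.2, st.1, st.2.1)

-- ===== PORT B =====
def mj_getBBsExtent_alt (image_bbs : List (List (List Int))) : Int × Int × Int × Int :=
  let xs := image_bbs.flatMap (fun bb => [pvCoord bb 0 0, pvCoord bb 1 0])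
  let ys := image_bbs.flatMap (fun bb => [pvCoord bb 0 1, pvCoord bb 1 1])
  let sx := PySem.List.sorted xs (fun v => v) false
  let sy := PySem.List.sorted ys (fun v => v) false
  (PySem.List.pyGetD sx 0 0, PySem.List.pyGetD sy 0 0,
   PySem.List.pyGetD sx (-1) 0, PySem.List.pyGetD sy (-1) 0)

-- ===== PRECONDITION & SPEC =====
-- exactly where Python A returns: a nonempty list whose boxes have at least two points,
-- the first two points having at least two coordinates each
def Pre_mj_getBBsExtent (image_bbs : List (List (List Int))) : Prop :=
  image_bbs ≠ [] ∧ ∀ bb ∈ image_bbs,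
    2 ≤ bb.length ∧ 2 ≤ (bb.getD 0 []).length ∧ 2 ≤ (bb.getD 1 []).length
instance (image_bbs : List (List (List Int))) : Decidable (Pre_mj_getBBsExtent image_bbs) := by
  unfold Pre_mj_getBBsExtent; infer_instance
def pvWitness_mj_getBBsExtent : List (List (List Int)) := [[[1, 2], [3, 4]], [[0, 7], [5, -1]]]

def Spec_mj_getBBsExtent (image_bbs : List (List (List Int))) (out : Int × Int × Int × Int) : Prop := out = mj_getBBsExtent_alt image_bbs
instance (image_bbs : List (List (List Int))) (out : Int × Int × Int × Int) : Decidable (Spec_mj_getBBsExtent image_bbs out) := by unfold Spec_mj_getBBsExtent; infer_instance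

-- ===== CLAIM (what is proved, stated in full; the proofs are below) =====
def Claim_equal_mj_getBBsExtent : Prop := ∀ (image_bbs : List (List (List Int))), Dom_mj_getBBsExtent image_bbs → Pre_mj_getBBsExtent image_bbs → Spec_mj_getBBsExtent image_bbs (mj_getBBsExtent image_bbs)

-- ===== LEMMAS AND PROOFS =====
-- A's loop over the remaining boxes computes exactly the four fold-reductions of the
-- flattened coordinate lists of those boxes.
theorem pvFoldA_eq (rest : List (List (List Int))) (mx my nx ny : Int) :
    rest.foldl pvStepA (mx, my, nx, ny) =
      ((rest.flatMap (fun bb => [pvCoord bb 0 0, pvCoord bb 1 0])).foldl max mx,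
       (rest.flatMap (fun bb => [pvCoord bb 0 1, pvCoord bb 1 1])).foldl max my,
       (rest.flatMap (fun bb => [pvCoord bb 0 0, pvCoord bb 1 0])).foldl min nx,
       (rest.flatMap (fun bb => [pvCoord bb 0 1, pvCoord bb 1 1])).foldl min ny) := by
  induction rest generalizing mx my nx ny with
  | nil => simp
  | cons bb rest ih => simp [List.foldl, pvStepA, ih]

-- the first element of sorted(x :: t) is the running-min of the list
theorem pvHead_sorted (x : Int) (t : List Int) :
    PySem.List.pyGetD (PySem.List.sorted (x :: t) (fun v => v) false) 0 0 = t.foldl min x := by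
  have hne : PySem.List.sorted (x :: t) (fun v => v) false ≠ [] := by
    simp [PySem.List.sorted_eq_nil_iff]
  obtain ⟨h, rest, heq⟩ := List.exists_cons_of_ne_nil hne
  have hm : PySem.List.min? (x :: t) (fun v => v) = some (t.foldl min x) :=
    PySem.List.min?_id_cons x t
  have hmem : t.foldl min x ∈ x :: t := PySem.List.min?_mem hm
  have hmin : ∀ y ∈ x :: t, t.foldl min x ≤ y := PySem.List.min?_isMin hm
  have hh : h ∈ x :: t := by
    have : h ∈ PySem.List.sorted (x :: t) (fun v => v) false := by
      rw [heq]; exact List.mem_cons_self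
    exact (PySem.List.mem_sorted _ _ _ _).mp this
  have h1 : h ≤ t.foldl min x := PySem.List.key_head_sorted_le _ _ heq _ hmem
  have h2 : t.foldl min x ≤ h := hmin h hh
  rw [heq, PySem.List.pyGetD_zero_cons]
  omega

-- the last element of sorted(x :: t) is the running-max of the list
theorem pvLast_sorted (x : Int) (t : List Int) :
    PySem.List.pyGetD (PySem.List.sorted (x :: t) (fun v => v) false) (-1) 0 = t.foldl max x := by
  set s := PySem.List.sorted (x :: t) (fun v => v) false with hs
  have hne : s ≠ [] := by simp [hs, PySem.List.sorted_eq_nil_iff]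
  have hm : PySem.List.max? (x :: t) (fun v => v) = some (t.foldl max x) :=
    PySem.List.max?_id_cons x t
  have hmem : t.foldl max x ∈ x :: t := PySem.List.max?_mem hm
  have hmax : ∀ y ∈ x :: t, y ≤ t.foldl max x := PySem.List.max?_isMax hm
  have hlastmem : s.getLast hne ∈ x :: t := by
    have : s.getLast hne ∈ s := List.getLast_mem hne
    exact (PySem.List.mem_sorted _ _ _ _).mp this
  have h1 : s.getLast hne ≤ t.foldl max x := hmax _ hlastmem
  have hmem_s : t.foldl max x ∈ s := by
    rw [hs]; exact (PySem.List.mem_sorted _ _ _ _).mpr hmem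
  obtain ⟨p, hp, hpe⟩ := List.mem_iff_getElem.mp hmem_s
  have hlen : 0 < s.length := List.length_pos_iff.mpr hne
  have h2 : t.foldl max x ≤ s.getLast hne := by
    rw [List.getLast_eq_getElem]
    calc t.foldl max x = s[p] := hpe.symm
      _ ≤ s[s.length - 1] := by
          have := PySem.List.sorted_id_getElem_mono (xs := x :: t)
            (p := p) (q := s.length - 1) (by omega) (by rw [← hs]; omega)
          simpa [← hs] using this
  rw [PySem.List.pyGetD_neg_one s 0 hne]
  omega

theorem mj_getBBsExtent_spec : Claim_equal_mj_getBBsExtent := by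
  intro image_bbs _ hpre
  obtain ⟨hne, -⟩ := hpre
  obtain ⟨bb0, rest, rfl⟩ := List.exists_cons_of_ne_nil hne
  unfold Spec_mj_getBBsExtent
  simp only [mj_getBBsExtent, mj_getBBsExtent_alt]
  rw [PySem.List.foldl_pyRange_pyGetD' (bb0 :: rest) [] pvStepA _ (a := 1) (by norm_num)]
  simp only [PySem.List.pyGetD_zero_cons, pvFoldA_eq]
  simp only [List.flatMap_cons, List.cons_append,
    pvHead_sorted, pvLast_sorted]
  simp [List.foldl]
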